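-- pv_equiv track=rewrite | github.com/autowww/forge-fleet | scripts/check-docs-examples.py | _quoted_hash_line
-- ===== SOURCE A (Python) =====
-- def _quoted_hash_line(line: str) -> bool:
--     """True if first `#` is inside a single-quoted bash string (rough heuristic)."""
--     if "#" not in line:
--         return False
--     parts = line.split("'")
--     if len(parts) < 2:
--         return False
--     first = line.find("#")
--     # odd index segments are inside ' ... '
--     pos = 0
--     for i, seg in enumerate(parts):
--         seg_len = len(seg) + (1 if i else 0)
--         if i % 2 == 1:
--             start = line.find(seg, pos)
--             end = start + len(seg)
--             if start <= first < end:
--                 return True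
--         pos += seg_len
--     return False
-- ===== SOURCE B (Python) =====
-- def _quoted_hash_line(line: str) -> bool:
--     """True if first `#` is inside a single-quoted bash string (rough heuristic)."""
--     in_quote = False
--     for ch in line:
--         if ch == "#":
--             return in_quote
--         if ch == "'":
--             in_quote = not in_quote
--     return False
-- ===== Notes on version B (the rewrite author's own statement) =====
-- stated objective: simpler
-- what changed: Replaces A's split-on-quote / enumerate-segments / relocate-each-segment-with-find approach by a single left-to-right character scan that toggles an in_quote flag and returns it at the first hash character.
import Mathlib
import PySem

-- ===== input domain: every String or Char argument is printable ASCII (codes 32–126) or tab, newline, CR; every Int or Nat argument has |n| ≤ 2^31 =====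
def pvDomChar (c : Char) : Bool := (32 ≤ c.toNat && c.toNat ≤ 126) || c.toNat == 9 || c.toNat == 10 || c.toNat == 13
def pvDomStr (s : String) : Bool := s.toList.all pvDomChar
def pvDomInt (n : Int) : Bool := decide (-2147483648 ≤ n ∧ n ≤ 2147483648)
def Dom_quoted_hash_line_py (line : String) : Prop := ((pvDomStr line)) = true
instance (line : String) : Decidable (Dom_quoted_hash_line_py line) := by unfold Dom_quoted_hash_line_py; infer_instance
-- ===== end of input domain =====

-- B replaces A's split-on-quote / enumerate-segments / relocate-each-segment scan by a
-- single left-to-right character scan toggling an in_quote flag (objective: simpler).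

-- ===== PORT A =====
-- the 'for i, seg in enumerate(parts)' loop with accumulator pos and early 'return True'
def pvALoop (l : List Char) (first : Int) : List (Int × List Char) → Int → Bool
  | [], _ => false
  | (i, seg) :: rest, pos =>
    let segLen : Int := (seg.length : Int) + (if i ≠ 0 then 1 else 0)
    if PySem.Int.mod i 2 == 1 then
      let start := PySem.Chars.findFrom l seg pos
      let stop := start + (seg.length : Int)
      if start ≤ first ∧ first < stop then true
      else pvALoop l first rest (pos + segLen)
    else pvALoop l first rest (pos + segLen)

def quoted_hash_line_py (line : String) : Bool :=
  let l := line.toList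
  if PySem.Chars.isIn ['#'] l = false then false
  else
    match PySem.Chars.split? l ['\''] with
    | none => false   -- unreachable: the separator "'" is non-empty, split never raises
    | some parts =>
      if parts.length < 2 then false
      else
        let first := PySem.Chars.find l ['#']
        pvALoop l first (PySem.List.enumerate parts 0) 0

-- ===== PORT B =====
-- the 'for ch in line' scan with the in_quote flag and early returns
def pvScan : List Char → Bool → Bool
  | [], _ => false
  | c :: rest, inq =>
    if c = '#' then inq
    else if c = '\'' then pvScan rest (!inq)
    else pvScan rest inq

def quoted_hash_line_py_alt (line : String) : Bool := pvScan line.toList false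

-- ===== PRECONDITION & SPEC =====
def Spec_quoted_hash_line_py (line : String) (out : Bool) : Prop := out = quoted_hash_line_py_alt line
instance (line : String) (out : Bool) : Decidable (Spec_quoted_hash_line_py line out) := by unfold Spec_quoted_hash_line_py; infer_instance

-- ===== CLAIM (what is proved, stated in full; the proofs are below) =====
def Claim_equal_quoted_hash_line_py : Prop := ∀ (line : String), Dom_quoted_hash_line_py line → Spec_quoted_hash_line_py line (quoted_hash_line_py line)

-- ===== LEMMAS AND PROOFS =====

def pvSplit : List Char → List (List Char)
  | [] => [[]]
  | c :: rest => if c = '\'' then [] :: pvSplit rest else (pvSplit rest).modifyHead (c :: ·)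

theorem pvSplit_ne_nil (l : List Char) : pvSplit l ≠ [] := by
  induction l with
  | nil => simp [pvSplit]
  | cons c rest ih =>
    simp only [pvSplit]
    split_ifs
    · simp
    · cases h : pvSplit rest with
      | nil => exact absurd h ih
      | cons a t => simp [List.modifyHead]

theorem length_pvSplit (l : List Char) : (pvSplit l).length = l.count '\'' + 1 := by
  induction l with
  | nil => simp [pvSplit]
  | cons c rest ih =>
    by_cases h : c = '\''
    · simp [pvSplit, h, List.count_cons, ih]
    · simp [pvSplit, h, List.count_cons, ih]

theorem intercalate_pvSplit (l : List Char) : List.intercalate ['\''] (pvSplit l) = l := by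
  induction l with
  | nil => simp [pvSplit, List.intercalate]
  | cons c rest ih =>
    simp only [pvSplit]
    split_ifs with h
    · subst h
      cases hr : pvSplit rest with
      | nil => exact absurd hr (pvSplit_ne_nil rest)
      | cons a t =>
        rw [hr] at ih
        simpa [List.intercalate, List.intersperse] using ih
    · cases hr : pvSplit rest with
      | nil => exact absurd hr (pvSplit_ne_nil rest)
      | cons a t =>
        rw [hr] at ih
        cases t with
        | nil => simpa [List.intercalate, List.modifyHead] using congrArg (c :: ·) ih
        | cons b t' =>
          simp only [List.modifyHead]
          simp only [List.intercalate, List.intersperse, List.flatten] at ih ⊢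
          simp_all

theorem mem_pvSplit_quote_free (l : List Char) : ∀ p ∈ pvSplit l, '\'' ∉ p := by
  induction l with
  | nil => simp [pvSplit]
  | cons c rest ih =>
    simp only [pvSplit]
    split_ifs with h
    · intro p hp
      rcases List.mem_cons.1 hp with h' | h'
      · simp [h']
      · exact ih p h'
    · cases hr : pvSplit rest with
      | nil => exact absurd hr (pvSplit_ne_nil rest)
      | cons a t =>
        rw [hr] at ih
        intro p hp
        rcases List.mem_cons.1 hp with h' | h'
        · subst h'
          intro hm
          rcases List.mem_cons.1 hm with h' | h'
          · exact h h'.symm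
          · exact ih a (by simp) h'
        · exact ih p (by simp [h'])

theorem splitOn_go_eq : ∀ (fuel : Nat) (l cur : List Char) (acc : List (List Char)),
    l.length < fuel →
    PySem.Chars.splitOn.go ['\''] fuel l cur acc
      = acc.reverse ++ (pvSplit l).modifyHead (cur.reverse ++ ·) := by
  intro fuel
  induction fuel with
  | zero => intro l cur acc h; omega
  | succ n ih =>
    intro l cur acc h
    cases l with
    | nil =>
      rw [PySem.Chars.splitOn.go]
      · simp [pvSplit, List.modifyHead]
      · omega
    | cons c rest =>
      rw [PySem.Chars.splitOn.go]
      by_cases hc : c = '\''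
      · have hp : List.isPrefixOf ['\''] (c :: rest) = true := by simp [hc, List.isPrefixOf]
        rw [if_pos hp]
        have hdrop : List.drop ['\''].length (c :: rest) = rest := by simp
        rw [hdrop]
        rw [ih rest [] (cur.reverse :: acc) (by simpa using Nat.lt_of_succ_lt_succ (by simpa using h))]
        cases hps : pvSplit rest with
        | nil => exact absurd hps (pvSplit_ne_nil rest)
        | cons a t => simp [pvSplit, hc, hps, List.modifyHead]
      · have hp : List.isPrefixOf ['\''] (c :: rest) = false := by
          simp [List.isPrefixOf]
          intro h'; exact absurd h'.symm hc
        rw [if_neg (by simp [hp])]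
        rw [ih rest (c :: cur) acc (by simpa using Nat.lt_of_succ_lt_succ (by simpa using h))]
        have hnn := pvSplit_ne_nil rest
        cases hps : pvSplit rest with
        | nil => exact absurd hps hnn
        | cons a t => simp [pvSplit, hc, hps, List.modifyHead]

theorem splitOn_eq (l : List Char) : PySem.Chars.splitOn l ['\''] = pvSplit l := by
  rw [PySem.Chars.splitOn]
  rw [splitOn_go_eq (l.length + 1) l [] [] (by omega)]
  have := pvSplit_ne_nil l
  cases h : pvSplit l with
  | nil => exact absurd h this
  | cons a t => simp [List.modifyHead]

theorem prefix_singleton_drop_iff (c : Char) (l : List Char) (j : Nat) :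
    ([c] <+: l.drop j) ↔ l[j]? = some c := by
  have hg : l[j]? = (l.drop j)[0]? := by simp [List.getElem?_drop]
  rw [hg]
  cases h : l.drop j with
  | nil => simp
  | cons a t =>
    constructor
    · rintro ⟨u, hu⟩
      cases hu; simp
    · intro ha
      simp at ha
      exact ⟨t, by simp [ha]⟩

theorem pvScan_no_hash (l : List Char) : ∀ (inq : Bool), '#' ∉ l → pvScan l inq = false := by
  induction l with
  | nil => intro inq _; rfl
  | cons c rest ih =>
    intro inq h
    have hc : ¬ c = '#' := fun hh => h (by simp [hh])
    have hr : '#' ∉ rest := fun hh => h (by simp [hh])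
    by_cases hq : c = '\''
    · simp [pvScan, hc, hq, ih _ hr]
    · simp [pvScan, hc, hq, ih _ hr]

theorem pvScan_first (l : List Char) : ∀ (inq : Bool) (f : Nat),
    l[f]? = some '#' → (∀ j < f, l[j]? ≠ some '#') →
    pvScan l inq = (inq ^^ decide ((l.take f).count '\'' % 2 = 1)) := by
  induction l with
  | nil => intro inq f hf _; simp at hf
  | cons c rest ih =>
    intro inq f hf hmin
    by_cases hc : c = '#'
    · have hf0 : f = 0 := by
        by_contra hne
        exact hmin 0 (Nat.pos_of_ne_zero hne) (by simp [hc])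
      subst hf0
      simp [pvScan, hc]
    · cases f with
      | zero => simp at hf; exact absurd hf hc
      | succ f' =>
        have hf' : rest[f']? = some '#' := by simpa using hf
        have hmin' : ∀ j < f', rest[j]? ≠ some '#' := by
          intro j hj
          have := hmin (j+1) (by omega)
          simpa using this
        by_cases hq : c = '\''
        · rw [show pvScan (c :: rest) inq = pvScan rest (!inq) by simp [pvScan, hc, hq]]
          rw [ih (!inq) f' hf' hmin']
          have : ((c :: rest).take (f' + 1)).count '\'' = (rest.take f').count '\'' + 1 := by
            simp [List.count_cons, hq]
          rw [this]
          rcases Nat.even_or_odd ((rest.take f').count '\'') with he | he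
          · have h1 := Nat.even_iff.mp he
            have h2 : ((rest.take f').count '\'' + 1) % 2 = 1 := by omega
            simp [h1, h2]
          · have h1 := Nat.odd_iff.mp he
            have h2 : ((rest.take f').count '\'' + 1) % 2 = 0 := by omega
            simp [h1, h2]
        · rw [show pvScan (c :: rest) inq = pvScan rest inq by simp [pvScan, hc, hq]]
          rw [ih inq f' hf' hmin']
          have : ((c :: rest).take (f' + 1)).count '\'' = (rest.take f').count '\'' := by
            simp [List.count_cons, hq]
          rw [this]

theorem findFrom_after_quote (l pre seg r : List Char)
    (hl : l = pre ++ '\'' :: (seg ++ r)) (hq : '\'' ∉ seg) :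
    PySem.Chars.findFrom l seg ↑pre.length
      = if seg = [] then (pre.length : Int) else (pre.length : Int) + 1 := by
  have hle : pre.length ≤ l.length := by subst hl; simp
  rw [PySem.Chars.findFrom_natCast l seg pre.length hle]
  have hdrop : l.drop pre.length = '\'' :: (seg ++ r) := by
    subst hl; rw [List.drop_append_of_le_length (by simp)]; simp
  rw [hdrop]
  by_cases hs : seg = []
  · subst hs
    simp [PySem.Chars.find_nil]
  · have hinf : seg <:+: '\'' :: (seg ++ r) := ⟨['\''], r, by simp⟩
    have h0 : 0 ≤ PySem.Chars.find ('\'' :: (seg ++ r)) seg :=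
      (PySem.Chars.find_nonneg_iff _ _).mpr hinf
    obtain ⟨hpre, hmin⟩ := PySem.Chars.find_spec h0
    set t := (PySem.Chars.find ('\'' :: (seg ++ r)) seg).toNat with ht
    have hpre' : seg <+: List.drop t ('\'' :: (seg ++ r)) := hpre
    have ht0 : t ≠ 0 := by
      intro h00
      rw [h00, List.drop_zero] at hpre'
      obtain ⟨c, cs, hc⟩ := List.exists_cons_of_ne_nil hs
      rw [hc] at hpre'
      obtain ⟨u, hu⟩ := hpre'
      simp at hu
      exact hq (by rw [hc]; exact List.mem_cons.2 (Or.inl hu.1.symm))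
    have ht1 : t ≤ 1 := by
      by_contra hgt
      exact hmin 1 (by omega) (by simp [List.prefix_append])
    have htt : t = 1 := by omega
    have hfind : PySem.Chars.find ('\'' :: (seg ++ r)) seg = 1 := by
      rw [← Int.toNat_of_nonneg h0, ← ht, htt]; rfl
    rw [hfind]
    simp [hs]

-- count of quotes in l.take f when f points inside segment seg
theorem count_take_mid (l pre seg r : List Char) (f : Nat)
    (hl : l = pre ++ '\'' :: (seg ++ r)) (hq : '\'' ∉ seg)
    (h1 : pre.length < f) (h2 : f ≤ pre.length + 1 + seg.length) :
    (l.take f).count '\'' = pre.count '\'' + 1 := by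
  subst hl
  rw [List.take_append, List.take_of_length_le (le_of_lt h1)]
  obtain ⟨m, hm⟩ : ∃ m, f - pre.length = m + 1 := ⟨f - pre.length - 1, by omega⟩
  rw [hm, List.take_succ_cons, List.count_append, List.count_cons]
  have hmseg : m ≤ seg.length := by omega
  rw [List.take_append_of_le_length hmseg]
  have hz : (seg.take m).count '\'' = 0 :=
    List.count_eq_zero.mpr (fun hmem => hq (List.mem_of_mem_take hmem))
  simp [hz]

theorem getElem?_at_quote (l pre rest : List Char) (hl : l = pre ++ '\'' :: rest) :
    l[pre.length]? = some '\'' := by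
  subst hl
  rw [List.getElem?_append_right (le_refl _)]
  simp

theorem mod_beq_eq (i : Nat) : (PySem.Int.mod (i : Int) 2 == 1) = decide (i % 2 = 1) := by
  have h : PySem.Int.mod (i : Int) 2 = ((i % 2 : Nat) : Int) := by
    exact_mod_cast PySem.Int.mod_natCast i 2
  rcases Nat.mod_two_eq_zero_or_one i with h2 | h2 <;> simp [h, h2] <;> omega

theorem intercalate_cons₂ (a b : List Char) (t : List (List Char)) :
    List.intercalate ['\''] (a :: b :: t) = a ++ '\'' :: List.intercalate ['\''] (b :: t) := by
  simp [List.intercalate, List.intersperse]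

theorem pvALoop_spec (l : List Char) (f : Nat) (hf : l[f]? = some '#') :
    ∀ (ps : List (List Char)) (pre : List Char) (i : Nat), 1 ≤ i →
    (∀ p ∈ ps, '\'' ∉ p) →
    l = pre ++ '\'' :: List.intercalate ['\''] ps →
    pre.count '\'' = i - 1 →
    pvALoop l ↑f (PySem.List.enumerate ps ↑i) ↑pre.length
      = decide (pre.length ≤ f ∧ (l.take f).count '\'' % 2 = 1) := by
  have hflt : f < l.length := (List.getElem?_eq_some_iff.mp hf).1
  intro ps
  induction ps with
  | nil =>
    intro pre i hi1 hqf hl hcnt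
    have hfq : f ≠ pre.length := by
      intro he
      rw [he, getElem?_at_quote l pre _ (by simpa using hl)] at hf
      simp at hf
    have hlen : l.length = pre.length + 1 := by rw [hl]; simp [List.intercalate]
    simp only [PySem.List.enumerate_nil, pvALoop]
    have : ¬ (pre.length ≤ f) := by omega
    simp [this]
  | cons seg ps' ih =>
    intro pre i hi1 hqf hl hcnt
    -- tail r of the decomposition l = pre ++ '\'' :: (seg ++ r)
    obtain ⟨r, hr, hrcase⟩ :
        ∃ r, l = pre ++ '\'' :: (seg ++ r) ∧
          (ps' = [] ∧ r = [] ∨ ps' ≠ [] ∧ r = '\'' :: List.intercalate ['\''] ps') := by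
      cases ps' with
      | nil => exact ⟨[], by simpa [List.intercalate] using hl, Or.inl ⟨rfl, rfl⟩⟩
      | cons b t =>
        refine ⟨'\'' :: List.intercalate ['\''] (b :: t), ?_, Or.inr ⟨by simp, rfl⟩⟩
        rw [hl, intercalate_cons₂]
    have hseg : '\'' ∉ seg := hqf seg (by simp)
    have hfq : f ≠ pre.length := by
      intro he
      rw [he, getElem?_at_quote l pre _ (by rw [hr])] at hf
      simp at hf
    have hine : (↑i : Int) ≠ 0 := by exact_mod_cast Nat.one_le_iff_ne_zero.mp hi1
    have hsegcnt : seg.count '\'' = 0 := List.count_eq_zero.mpr hseg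
    -- the common tail step
    have key : (pre.length < f → f < pre.length + 1 + seg.length →
          (l.take f).count '\'' % 2 = 1 → False) →
        pvALoop l ↑f (PySem.List.enumerate ps' (↑i + 1)) (↑pre.length + ((seg.length : Int) + 1))
          = decide (pre.length ≤ f ∧ (l.take f).count '\'' % 2 = 1) := by
      intro hmid
      have hpos : (↑pre.length + ((seg.length : Int) + 1)) = ((pre ++ '\'' :: seg).length : Int) := by
        push_cast [List.length_append, List.length_cons]; ring
      have hcast : ((i : Int) + 1) = ((i + 1 : Nat) : Int) := by push_cast; ring
      rcases hrcase with ⟨hps, hrnil⟩ | ⟨hps, hrval⟩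
      · subst hps
        rw [PySem.List.enumerate_nil]
        have hlen : l.length = pre.length + 1 + seg.length := by
          rw [hr, hrnil]; simp; omega
        simp only [pvALoop]
        symm
        rw [decide_eq_false_iff_not]
        rintro ⟨h1, h2⟩
        exact hmid (by omega) (by omega) h2
      · have hl' : l = (pre ++ '\'' :: seg) ++ '\'' :: List.intercalate ['\''] ps' := by
          rw [hr, hrval]; simp
        have hcnt' : (pre ++ '\'' :: seg).count '\'' = (i + 1) - 1 := by
          rw [List.count_append, List.count_cons]
          simp [hsegcnt, hcnt]
          omega
        rw [hpos, hcast,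
          ih (pre ++ '\'' :: seg) (i + 1) (by omega)
            (fun p hp => hqf p (by simp [hp])) hl' hcnt']
        have hlen' : (pre ++ '\'' :: seg).length = pre.length + 1 + seg.length := by simp; omega
        rw [decide_eq_decide]
        constructor
        · rintro ⟨h1, h2⟩
          exact ⟨by omega, h2⟩
        · rintro ⟨h1, h2⟩
          refine ⟨?_, h2⟩
          by_contra hlt
          exact hmid (by omega) (by omega) h2
    by_cases hodd : i % 2 = 1
    · -- odd segment: locate it and test the first '#'
      rw [PySem.List.enumerate_cons]
      simp only [pvALoop, mod_beq_eq, hodd, decide_true, if_pos, hine, ne_eq,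
        not_false_eq_true, if_true]
      rw [findFrom_after_quote l pre seg r hr hseg]
      by_cases hsnil : seg = []
      · subst hsnil
        simp only [if_true]
        have hcond : ¬ ((pre.length : Int) ≤ ↑f ∧ (↑f : Int) < ↑pre.length + ↑(List.length ([] : List Char)) ) := by
          simp
        rw [if_neg (by simpa using hcond)]
        simpa using key (fun h1 h2 _ => by simp at h2; omega)
      · rw [if_neg hsnil]
        by_cases hc : pre.length + 1 ≤ f ∧ f < pre.length + 1 + seg.length
        · rw [if_pos (by push_cast; omega)]
          symm
          rw [decide_eq_true_iff]
          refine ⟨by omega, ?_⟩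
          rw [count_take_mid l pre seg r f hr hseg (by omega) (by omega), hcnt]
          omega
        · rw [if_neg (by push_cast; omega)]
          exact key (fun h1 h2 _ => hc ⟨by omega, by omega⟩)
    · -- even segment: just advance
      rw [PySem.List.enumerate_cons]
      simp only [pvALoop, mod_beq_eq, hodd, decide_false, if_false, hine, ne_eq,
        not_false_eq_true, if_true, Bool.false_eq_true]
      exact key (fun h1 h2 hP => by
        rw [count_take_mid l pre seg r f hr hseg (by omega) (by omega), hcnt] at hP
        omega)

-- ===== VERDICT (by name: the statement is the Claim_ definition above) =====
theorem quoted_hash_line_py_spec : Claim_equal_quoted_hash_line_py := by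
  intro line _
  unfold Spec_quoted_hash_line_py quoted_hash_line_py quoted_hash_line_py_alt
  set l := line.toList with hldef
  by_cases hhash : '#' ∈ l
  · have hIn : PySem.Chars.isIn ['#'] l = true :=
      (PySem.Chars.isIn_iff_infix _ _).mpr ((List.singleton_infix_iff _ _).mpr hhash)
    simp only [PySem.Chars.split?]
    simp only [hIn, Bool.true_eq_false, if_false, List.isEmpty_cons, if_neg Bool.false_ne_true]
    rw [splitOn_eq]
    have h0 : 0 ≤ PySem.Chars.find l ['#'] :=
      (PySem.Chars.find_nonneg_iff _ _).mpr ((List.singleton_infix_iff _ _).mpr hhash)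
    obtain ⟨hpre, hmin⟩ := PySem.Chars.find_spec h0
    set f := (PySem.Chars.find l ['#']).toNat with hfdef
    have hFf : PySem.Chars.find l ['#'] = ↑f := (Int.toNat_of_nonneg h0).symm
    have hf : l[f]? = some '#' := (prefix_singleton_drop_iff _ _ _).mp hpre
    have hmin' : ∀ j < f, l[j]? ≠ some '#' :=
      fun j hj hEq => hmin j hj ((prefix_singleton_drop_iff _ _ _).mpr hEq)
    rw [pvScan_first l false f hf hmin']
    by_cases hq : '\'' ∈ l
    · have hcnt1 : 1 ≤ l.count '\'' := List.count_pos_iff.mpr hq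
      have hlen2 : ¬ (pvSplit l).length < 2 := by rw [length_pvSplit]; omega
      rw [if_neg hlen2]
      cases hps : pvSplit l with
      | nil => exact absurd hps (pvSplit_ne_nil l)
      | cons p0 ps =>
        have hqfree := mem_pvSplit_quote_free l
        rw [hps] at hqfree
        have hp0 : '\'' ∉ p0 := hqfree p0 (by simp)
        have hpsne : ps ≠ [] := by
          intro he
          rw [hps, he] at hlen2
          exact hlen2 (by simp)
        obtain ⟨b, t, hbt⟩ := List.exists_cons_of_ne_nil hpsne
        have hl0 : l = p0 ++ '\'' :: List.intercalate ['\''] ps := by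
          conv_lhs => rw [← intercalate_pvSplit l]
          rw [hps, hbt, intercalate_cons₂]
        have hcnt0 : p0.count '\'' = 1 - 1 := by
          simp [List.count_eq_zero.mpr hp0]
        have hz : PySem.List.enumerate (p0 :: ps) 0 = (0, p0) :: PySem.List.enumerate ps 1 := by
          rw [PySem.List.enumerate_cons]; norm_num
        rw [hz]
        have hmod0 : (PySem.Int.mod (0 : Int) 2 == 1) = false := by decide
        simp only [pvALoop, hmod0, Bool.false_eq_true, if_false, ne_eq, not_true_eq_false,
          decide_false]
        rw [hFf, show ((0 : Int) + ((p0.length : Int) + 0)) = ((p0.length : Nat) : Int) by ring]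
        have hspec := pvALoop_spec l f hf ps p0 1 (le_refl 1)
          (fun p hp => hqfree p (by simp [hp])) hl0 hcnt0
        rw [Nat.cast_one] at hspec
        rw [hspec]
        have hfq0 : f ≠ p0.length := by
          intro he
          rw [he, getElem?_at_quote l p0 _ hl0] at hf
          simp at hf
        by_cases hfp : p0.length ≤ f
        · simp [hfp]
        · have hlt : f < p0.length := by omega
          have htake : l.take f = p0.take f := by
            rw [hl0, List.take_append]
            simp [Nat.sub_eq_zero_of_le (le_of_lt hlt)]
          have hcz : (l.take f).count '\'' = 0 := by
            rw [htake]
            exact List.count_eq_zero.mpr (fun h => hp0 (List.mem_of_mem_take h))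
          simp [hfp, hcz]
    · have hlt2 : (pvSplit l).length < 2 := by
        rw [length_pvSplit, List.count_eq_zero.mpr hq]
        omega
      rw [if_pos hlt2]
      have hcz : (l.take f).count '\'' = 0 :=
        List.count_eq_zero.mpr (fun h => hq (List.mem_of_mem_take h))
      simp [hcz]
  · have hIn : PySem.Chars.isIn ['#'] l = false :=
      (PySem.Chars.isIn_eq_false_iff _ _).mpr
        (fun hinf => hhash ((List.singleton_infix_iff _ _).mp hinf))
    simp [hIn, pvScan_no_hash l false hhash]
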